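-- pv_equiv track=rewrite | github.com/theosfa/programming | Irina/2022-05-12/2022-04-21/test2.py | codify_string
-- ===== SOURCE A (Python) =====
-- def codify_string(txt: str) ->str:
--     l = ''
--     l1 = ''
--     for i in range(0, len(txt), 6):
--         l1 += list(txt)[i]
--
--     l2 = ''
--
--     for i in range(1, len(txt), 2):
--         if i % 3 != 0:
--             l2 += list(txt)[i]
--
--
--     l3 = ''
--     for i in range(2, len(txt), 2):
--         if i % 2 == 0:
--             l2 += list(txt)[i]
--
--
--     l4 = ''
--     for i in range(3, len(txt), 6):
--         l4 += list(txt)[i]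
--     l = l + l1 + l2 + l3 + l4
--     return l
-- ===== SOURCE B (Python) =====
-- def codify_string(txt: str) -> str:
--     p1 = ''
--     p2a = ''
--     p2b = ''
--     p4 = ''
--     for i, c in enumerate(txt):
--         if i % 6 == 0:
--             p1 += c
--         if i % 2 == 1 and i % 3 != 0:
--             p2a += c
--         if i >= 2 and i % 2 == 0:
--             p2b += c
--         if i % 6 == 3:
--             p4 += c
--     return p1 + p2a + p2b + p4
-- ===== Notes on version B (the rewrite author's own statement) =====
-- stated objective: faster
-- what changed: A's four separate index-stepping loops (each rebuilding list(txt) at every index access) are fused into a single enumerate pass that maintains four independent accumulators and concatenates them at the end.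
import Mathlib
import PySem

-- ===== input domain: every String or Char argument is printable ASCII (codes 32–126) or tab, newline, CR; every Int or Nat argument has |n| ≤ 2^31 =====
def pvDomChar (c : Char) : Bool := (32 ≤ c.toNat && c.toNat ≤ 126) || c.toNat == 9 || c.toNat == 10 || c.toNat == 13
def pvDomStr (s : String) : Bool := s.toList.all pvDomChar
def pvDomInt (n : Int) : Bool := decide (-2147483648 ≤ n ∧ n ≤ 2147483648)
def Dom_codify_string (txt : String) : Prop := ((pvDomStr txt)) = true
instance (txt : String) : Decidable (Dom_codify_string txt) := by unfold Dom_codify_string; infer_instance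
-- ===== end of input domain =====

-- B replaces A's four index-stepping scans (each rebuilding list(txt) per access) by ONE
-- enumerate pass with four independent accumulators (objective: faster, O(n) vs A's O(n^2)).

-- ===== PORT A =====
-- literal transliteration of A: four loops over stepped ranges, indexing list(txt)[i]
-- (pyGet? returns none exactly where Python would raise IndexError; the indices produced
-- by the ranges are always in bounds, so the none branch is never taken)
def codify_string (txt : String) : String :=
  let cs : List Char := txt.toList
  let n : Int := PySem.List.len cs
  let l : List Char := []
  let l1 : List Char :=
    (PySem.List.pyRange 0 n 6).foldl (fun acc i =>
      match PySem.List.pyGet? cs i with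
      | some c => acc ++ [c]
      | none => acc) []
  let l2 : List Char :=
    (PySem.List.pyRange 1 n 2).foldl (fun acc i =>
      if PySem.Int.mod i 3 != 0 then
        match PySem.List.pyGet? cs i with
        | some c => acc ++ [c]
        | none => acc
      else acc) []
  let l3 : List Char := []
  let l2 : List Char :=
    (PySem.List.pyRange 2 n 2).foldl (fun acc i =>
      if PySem.Int.mod i 2 == 0 then
        match PySem.List.pyGet? cs i with
        | some c => acc ++ [c]
        | none => acc
      else acc) l2
  let l4 : List Char :=
    (PySem.List.pyRange 3 n 6).foldl (fun acc i =>
      match PySem.List.pyGet? cs i with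
      | some c => acc ++ [c]
      | none => acc) []
  String.mk (l ++ l1 ++ l2 ++ l3 ++ l4)

-- ===== PORT B =====
-- literal transliteration of B: one pass over enumerate(txt) with four accumulators,
-- four independent ifs per character
def codify_string_alt (txt : String) : String :=
  let cs : List Char := txt.toList
  let r :=
    (PySem.List.enumerate cs).foldl (fun s p =>
      ((if PySem.Int.mod p.1 6 == 0 then s.1 ++ [p.2] else s.1),
       (if PySem.Int.mod p.1 2 == 1 && PySem.Int.mod p.1 3 != 0 then s.2.1 ++ [p.2] else s.2.1),
       (if decide (2 ≤ p.1) && PySem.Int.mod p.1 2 == 0 then s.2.2.1 ++ [p.2] else s.2.2.1),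
       (if PySem.Int.mod p.1 6 == 3 then s.2.2.2 ++ [p.2] else s.2.2.2)))
      (([] : List Char), ([] : List Char), ([] : List Char), ([] : List Char))
  String.mk (r.1 ++ r.2.1 ++ r.2.2.1 ++ r.2.2.2)

-- ===== PRECONDITION & SPEC =====
def Spec_codify_string (txt : String) (out : String) : Prop := out = codify_string_alt txt
instance (txt : String) (out : String) : Decidable (Spec_codify_string txt out) := by unfold Spec_codify_string; infer_instance

-- ===== CLAIM (what is proved, stated in full; the proofs are below) =====
def Claim_equal_codify_string : Prop := ∀ (txt : String), Dom_codify_string txt → Spec_codify_string txt (codify_string txt)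

-- ===== LEMMAS AND PROOFS =====

-- two strictly increasing integer lists with the same members are equal
theorem pvEqOfPairwiseLt : ∀ {l1 l2 : List Int}, l1.Pairwise (· < ·) → l2.Pairwise (· < ·) →
    (∀ x, x ∈ l1 ↔ x ∈ l2) → l1 = l2
  | [], [], _, _, _ => rfl
  | [], b :: t2, _, _, hm => absurd ((hm b).mpr (List.mem_cons_self)) (List.not_mem_nil)
  | a :: t1, [], _, _, hm => absurd ((hm a).mp (List.mem_cons_self)) (List.not_mem_nil)
  | a :: t1, b :: t2, h1, h2, hm => by
    rcases List.pairwise_cons.mp h1 with ⟨ha, h1'⟩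
    rcases List.pairwise_cons.mp h2 with ⟨hb, h2'⟩
    have hab : a = b := by
      rcases List.mem_cons.mp ((hm a).mp List.mem_cons_self) with h | h
      · exact h
      · rcases List.mem_cons.mp ((hm b).mpr List.mem_cons_self) with h' | h'
        · exact h'.symm
        · exact absurd (lt_trans (hb a h) (ha b h')) (lt_irrefl b)
    subst hab
    have ht : ∀ x, x ∈ t1 ↔ x ∈ t2 := by
      intro x
      constructor
      · intro hx
        rcases List.mem_cons.mp ((hm x).mp (List.mem_cons_of_mem _ hx)) with h | h
        · exact absurd (h ▸ ha x hx) (lt_irrefl a)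
        · exact h
      · intro hx
        rcases List.mem_cons.mp ((hm x).mpr (List.mem_cons_of_mem _ hx)) with h | h
        · exact absurd (h ▸ hb x hx) (lt_irrefl a)
        · exact h
    rw [pvEqOfPairwiseLt h1' h2' ht]

theorem pvPairwiseStep (a b st : Int) (hst : 0 < st) :
    (PySem.List.pyRange a b st).Pairwise (· < ·) := by
  rw [PySem.List.pyRange_of_pos a b hst]
  exact List.Pairwise.map _ (fun x y hxy => by nlinarith) List.pairwise_lt_range

-- a stepped range is the unit range filtered by a divisibility condition
theorem pvStepFilter (a b st : Int) (hst : 0 < st) :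
    PySem.List.pyRange a b st
      = (PySem.List.pyRange a b 1).filter (fun i => decide (st ∣ i - a)) := by
  apply pvEqOfPairwiseLt (pvPairwiseStep a b st hst)
    ((PySem.List.pairwise_lt_pyRange_one a b).filter _)
  intro x
  rw [PySem.List.mem_pyRange_iff_of_pos hst, List.mem_filter, PySem.List.mem_pyRange_one]
  simp only [decide_eq_true_iff]
  constructor
  · rintro ⟨h1, h2, h3⟩; exact ⟨⟨h1, h2⟩, h3⟩
  · rintro ⟨⟨h1, h2⟩, h3⟩; exact ⟨h1, h2, h3⟩

-- a filter whose condition forces s ≤ i may start the range at 0 instead of s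
theorem pvExtendFilter (s n : Int) (hs : 0 ≤ s) (c : Int → Bool)
    (hc : ∀ i, 0 ≤ i → i < s → c i = false) :
    (PySem.List.pyRange s n 1).filter c = (PySem.List.pyRange 0 n 1).filter c := by
  by_cases h : s ≤ n
  · rw [PySem.List.pyRange_one_append 0 s n hs h, List.filter_append]
    have : (PySem.List.pyRange 0 s 1).filter c = [] := by
      rw [List.filter_eq_nil_iff]
      intro i hi
      rw [PySem.List.mem_pyRange_one] at hi
      simp [hc i hi.1 hi.2]
    rw [this, List.nil_append]
  · rw [not_le] at h
    rw [PySem.List.pyRange_one_eq_nil h.le]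
    have : (PySem.List.pyRange 0 n 1).filter c = [] := by
      rw [List.filter_eq_nil_iff]
      intro i hi
      rw [PySem.List.mem_pyRange_one] at hi
      simp [hc i hi.1 (hi.2.trans h)]
    rw [this]
    rfl

-- in range, Python indexing returns exactly the default-free element
theorem pvGetSome (cs : List Char) (i : Int) (h0 : 0 ≤ i) (h1 : i < PySem.List.len cs) :
    PySem.List.pyGet? cs i = some (PySem.List.pyGetD cs i ' ') := by
  simp only [PySem.List.len] at h1
  have hlt : i.toNat < cs.length := by omega
  simp [PySem.List.pyGet?, PySem.List.pyGetD, PySem.List.pyIdx?, if_pos h0, if_pos h1, hlt]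

-- a fold with four independent accumulators is four folds
theorem pvFoldQuad {α β : Type} (f1 f2 f3 f4 : List α → β → List α) (l : List β)
    (a b c d : List α) :
    l.foldl (fun s p => (f1 s.1 p, f2 s.2.1 p, f3 s.2.2.1 p, f4 s.2.2.2 p)) (a, b, c, d)
      = (l.foldl f1 a, l.foldl f2 b, l.foldl f3 c, l.foldl f4 d) := by
  induction l generalizing a b c d with
  | nil => rfl
  | cons x t ih => simpa using ih (f1 a x) (f2 b x) (f3 c x) (f4 d x)

-- Python's % with a nonnegative modulus is Lean's emod
theorem pvMod (i m : Int) (h : 0 ≤ m) : PySem.Int.mod i m = i % m := by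
  simp only [PySem.Int.mod, Int.fmod_eq_emod, if_pos (Or.inl h), add_zero]

-- an A-loop over a stepped range normalised to a filter of the unit range from 0
theorem pvLoopNorm (cs : List Char) (s st : Int) (h0 : 0 ≤ s) (hst : 0 < st)
    (P : Int → Bool) (init : List Char) :
    (PySem.List.pyRange s (PySem.List.len cs) st).foldl (fun acc i =>
        if P i then
          match PySem.List.pyGet? cs i with
          | some c => acc ++ [c]
          | none => acc
        else acc) init
      = init ++ ((PySem.List.pyRange 0 (PySem.List.len cs) 1).filter
          (fun i => decide (s ≤ i) && decide (st ∣ i - s) && P i)).map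
          (fun i => PySem.List.pyGetD cs i ' ') := by
  rw [PySem.List.foldl_congr_mem _ _
      (fun acc i => if P i then acc ++ [PySem.List.pyGetD cs i ' '] else acc) _ ?_]
  · rw [PySem.List.foldl_append_if P (fun i => PySem.List.pyGetD cs i ' ')]
    congr 2
    rw [pvStepFilter s _ st hst, List.filter_filter,
        ← pvExtendFilter s _ h0 _ (fun i hi1 hi2 => by
          have hns : ¬ (s ≤ i) := by omega
          simp [hns])]
    apply List.filter_congr
    intro i hi
    rw [PySem.List.mem_pyRange_one] at hi
    by_cases hP : P i <;> by_cases hd : st ∣ i - s <;> simp [hP, hd, hi.1]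
  · intro acc i hi
    rw [PySem.List.mem_pyRange_iff_of_pos hst] at hi
    rw [pvGetSome cs i (h0.trans hi.1) hi.2.1]

-- a B-bucket normalised to the same shape
theorem pvBucketNorm (cs : List Char) (c : Int → Bool) :
    ((PySem.List.enumerate cs).foldl (fun acc p => if c p.1 then acc ++ [p.2] else acc) [])
      = ((PySem.List.pyRange 0 (PySem.List.len cs) 1).filter c).map
          (fun i => PySem.List.pyGetD cs i ' ') := by
  rw [PySem.List.foldl_append_if (fun p => c p.1) Prod.snd, List.nil_append]
  rw [PySem.List.enumerate_eq_map_pyRange cs ' ', List.filter_map, List.map_map]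
  rfl

-- ===== VERDICT (by name: the statement is the Claim_ definition above) =====
theorem codify_string_spec : Claim_equal_codify_string := by
  intro txt _
  unfold Spec_codify_string codify_string codify_string_alt
  dsimp only
  set cs := txt.toList with hcs
  set n := PySem.List.len cs with hn
  -- B side: split the quad fold into four buckets and normalise each
  rw [pvFoldQuad
      (fun t (p : Int × Char) => if PySem.Int.mod p.1 6 == 0 then t ++ [p.2] else t)
      (fun t (p : Int × Char) => if PySem.Int.mod p.1 2 == 1 && PySem.Int.mod p.1 3 != 0 then t ++ [p.2] else t)
      (fun t (p : Int × Char) => if decide (2 ≤ p.1) && PySem.Int.mod p.1 2 == 0 then t ++ [p.2] else t)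
      (fun t (p : Int × Char) => if PySem.Int.mod p.1 6 == 3 then t ++ [p.2] else t)
      (PySem.List.enumerate cs) [] [] [] []]
  rw [pvBucketNorm cs (fun i => PySem.Int.mod i 6 == 0),
      pvBucketNorm cs (fun i => PySem.Int.mod i 2 == 1 && PySem.Int.mod i 3 != 0),
      pvBucketNorm cs (fun i => decide (2 ≤ i) && PySem.Int.mod i 2 == 0),
      pvBucketNorm cs (fun i => PySem.Int.mod i 6 == 3)]
  -- A side: normalise the four loops (the unconditioned ones get the trivial condition)
  have hA1 := pvLoopNorm cs 0 6 (by norm_num) (by norm_num) (fun _ => true) []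
  have hA2 := pvLoopNorm cs 1 2 (by norm_num) (by norm_num)
      (fun i => PySem.Int.mod i 3 != 0) []
  have hA4 := pvLoopNorm cs 3 6 (by norm_num) (by norm_num) (fun _ => true) []
  simp only [if_true] at hA1 hA4
  rw [hA1, hA2, hA4,
      pvLoopNorm cs 2 2 (by norm_num) (by norm_num) (fun i => PySem.Int.mod i 2 == 0)]
  simp only [List.nil_append, List.append_nil, List.append_assoc]
  -- it remains to match the four filter conditions pointwise on 0 ≤ i
  have match_cond : ∀ (cA cB : Int → Bool),
      (∀ i : Int, 0 ≤ i → cA i = cB i) →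
      ((PySem.List.pyRange 0 n 1).filter cA).map (fun i => PySem.List.pyGetD cs i ' ')
        = ((PySem.List.pyRange 0 n 1).filter cB).map (fun i => PySem.List.pyGetD cs i ' ') := by
    intro cA cB h
    congr 1
    apply List.filter_congr
    intro i hi
    rw [PySem.List.mem_pyRange_one] at hi
    exact h i hi.1
  congr 2
  · apply match_cond
    intro i h0i
    rw [Bool.eq_iff_iff]
    simp only [pvMod _ 6 (by norm_num), Bool.and_eq_true, decide_eq_true_iff,
      beq_iff_eq, Bool.and_true]
    omega
  congr 1
  · apply match_cond
    intro i h0i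
    rw [Bool.eq_iff_iff]
    simp only [pvMod _ 2 (by norm_num), pvMod _ 3 (by norm_num), Bool.and_eq_true, decide_eq_true_iff, beq_iff_eq, bne_iff_ne, ne_eq]
    omega
  congr 1
  · apply match_cond
    intro i h0i
    rw [Bool.eq_iff_iff]
    simp only [pvMod _ 2 (by norm_num), Bool.and_eq_true, decide_eq_true_iff, beq_iff_eq]
    omega
  · apply match_cond
    intro i h0i
    rw [Bool.eq_iff_iff]
    simp only [pvMod _ 6 (by norm_num), Bool.and_eq_true, decide_eq_true_iff,
      beq_iff_eq, Bool.and_true]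
    omega
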